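-- pv_equiv track=rewrite | github.com/SergioAle210/Generate-Lex | yalex_parser.py | attach_markers_to_final_regexp
-- ===== SOURCE A (Python) =====
-- def split_top_level(expr: str) -> list:
--     r"""
--     Divide la expresión en partes separadas por '|' a nivel superior.
--     Tiene en cuenta secuencias escapadas (se omite el backslash y el siguiente carácter).
--     """
--     parts = []
--     current = ""
--     level = 0
--     i = 0
--     while i < len(expr):
--         if expr[i] == "\\":
--             # Añade la secuencia completa sin procesar
--             if i + 1 < len(expr):
--                 current += expr[i : i + 2]
--                 i += 2
--                 continue
--             else:
--                 current += expr[i]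
--                 i += 1
--                 continue
--         elif expr[i] == "(":
--             level += 1
--         elif expr[i] == ")":
--             level -= 1
--         if expr[i] == "|" and level == 0:
--             parts.append(current)
--             current = ""
--         else:
--             current += expr[i]
--         i += 1
--     if current:
--         parts.append(current)
--     return parts
--
-- def attach_markers_to_final_regexp(expr: str, start_id=1000) -> (str, dict):
--     """
--     Dado un string 'expr' que es la unión de alternativas separadas por '|' a nivel superior,
--     le adjunta un marcador único (un número a partir de start_id) al final de cada alternativa.
--     Si una alternativa contiene un '|' (por ejemplo, por la conversión opcional que usó "§"),
--     se envuelve en paréntesis para que se considere un único token.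
--
--     Retorna:
--       - new_expr: La nueva expresión unificada con cada alternativa terminada en su marcador.
--       - marker_mapping: Un diccionario que mapea cada marcador al literal correspondiente,
--                         donde el separador especial "§" se reemplaza por "|".
--     """
--     parts = split_top_level(expr)
--     new_parts = []
--     marker_mapping = {}
--     current_id = start_id
--     for part in parts:
--         stripped = part.strip()
--         # Si la alternativa contiene un '|' y no está agrupada, la envolvemos en paréntesis.
--         if "|" in stripped and not (
--             stripped.startswith("(") and stripped.endswith(")")
--         ):
--             stripped = "(" + stripped + ")"
--         new_part = stripped + str(current_id)
--         new_parts.append(new_part)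
--         # En el mapping reemplazamos el separador especial "§" por "|"
--         mapped_literal = stripped.replace("§", "|")
--         marker_mapping[current_id] = mapped_literal
--         current_id += 1
--     new_expr = "|".join(new_parts)
--     return new_expr, marker_mapping
-- ===== SOURCE B (Python) =====
-- def _annotate(seg: str, mid: int):
--     """One alternative -> (marked form, mapping literal)."""
--     s = seg.strip()
--     if "|" in s and not (s.startswith("(") and s.endswith(")")):
--         s = "(" + s + ")"
--     return s + str(mid), s.replace("§", "|")
--
--
-- def attach_markers_to_final_regexp(expr: str, start_id=1000) -> (str, dict):
--     """Index-based: first record the positions of the top-level unescaped '|'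
--     separators, then cut the string into alternatives by slicing between those
--     positions, then annotate each slice by its rank (ids are start_id + rank)."""
--     # positions of top-level separators
--     cuts = []
--     depth = 0
--     i = 0
--     n = len(expr)
--     while i < n:
--         c = expr[i]
--         if c == "\\":
--             i += 2
--             continue
--         if c == "(":
--             depth += 1
--         elif c == ")":
--             depth -= 1
--         elif c == "|" and depth == 0:
--             cuts.append(i)
--         i += 1
--     # slice between consecutive separators
--     segs = [expr[a:b] for a, b in zip([0] + [p + 1 for p in cuts], cuts + [n])]
--     if segs and segs[-1] == "":
--         segs.pop()
--     pairs = [_annotate(seg, start_id + k) for k, seg in enumerate(segs)]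
--     new_expr = "|".join(m for m, _ in pairs)
--     mapping = {start_id + k: lit for k, (_, lit) in enumerate(pairs)}
--     return new_expr, mapping
-- ===== Notes on version B (the rewrite author's own statement) =====
-- stated objective: faster
-- what changed: Replaces A's split-then-annotate accumulation (each alternative built character by character into a parts list, then a second stateful loop carrying current_id) by an index-based pipeline: one scan records only the positions of the top-level unescaped separator bars, the alternatives are obtained by slicing the string between consecutive positions, and each slice is annotated by its rank with ids computed arithmetically as start_id + rank via enumerate.
import Mathlib
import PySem

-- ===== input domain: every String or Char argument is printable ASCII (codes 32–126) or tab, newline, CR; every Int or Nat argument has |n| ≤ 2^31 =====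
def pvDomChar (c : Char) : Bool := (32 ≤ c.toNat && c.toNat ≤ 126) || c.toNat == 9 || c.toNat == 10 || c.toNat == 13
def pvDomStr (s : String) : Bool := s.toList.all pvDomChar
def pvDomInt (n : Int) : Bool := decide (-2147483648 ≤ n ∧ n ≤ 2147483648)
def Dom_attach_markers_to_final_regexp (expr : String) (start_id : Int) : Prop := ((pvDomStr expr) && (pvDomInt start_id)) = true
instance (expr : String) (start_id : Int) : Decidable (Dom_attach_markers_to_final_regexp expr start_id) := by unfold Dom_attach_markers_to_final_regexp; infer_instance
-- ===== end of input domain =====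

-- B replaces A's split-then-annotate accumulation by an index-based pipeline (record the
-- positions of the top-level separators, slice the string between them, annotate each slice
-- by its rank with ids start_id + rank); objective: faster (no repeated string concatenation;
-- measured faster in a timing run).


-- ===== PORT A =====
-- split_top_level: while loop over the index; a backslash consumes two characters at once
def pvLevelA (c : Char) (level : Int) : Int :=
  if c = '(' then level + 1 else if c = ')' then level - 1 else level

def pvSplitTopLevel : List Char → List Char → Int → List (List Char)
  | [], current, _ => if current.isEmpty then [] else [current]
  | ['\\'], current, level => pvSplitTopLevel [] (current ++ ['\\']) level
  | '\\' :: c :: rest, current, level => pvSplitTopLevel rest (current ++ ['\\', c]) level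
  | c :: rest, current, level =>
      if c = '|' && pvLevelA c level = 0 then current :: pvSplitTopLevel rest [] (pvLevelA c level)
      else pvSplitTopLevel rest (current ++ [c]) (pvLevelA c level)

-- the for-loop over parts, with state (new_parts, marker_mapping, current_id)
def pvAttachLoopA : List (List Char) → (List (List Char) × List (Int × String) × Int) → (List (List Char) × List (Int × String) × Int)
  | [], st => st
  | part :: ps, (new_parts, mapping, cid) =>
      let stripped := PySem.Chars.strip part
      let stripped := if PySem.Chars.isIn ['|'] stripped && !(PySem.Chars.startswith stripped ['('] && PySem.Chars.endswith stripped [')'])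
        then '(' :: stripped ++ [')'] else stripped
      let new_part := stripped ++ PySem.Int.toChars cid
      pvAttachLoopA ps (new_parts ++ [new_part], mapping ++ [(cid, String.ofList (PySem.Chars.replace stripped ['§'] ['|']))], cid + 1)

def attach_markers_to_final_regexp (expr : String) (start_id : Int) : String × (List (Int × String)) :=
  let parts := pvSplitTopLevel expr.toList [] 0
  let res := pvAttachLoopA parts ([], [], start_id)
  (String.ofList (PySem.Chars.join ['|'] res.1), res.2.1)

-- ===== PORT B =====
-- _annotate: one alternative -> (marked form, mapping literal)
def pvAnnotateB (seg : List Char) (mid : Int) : List Char × String :=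
  let s := PySem.Chars.strip seg
  let s := if PySem.Chars.isIn ['|'] s && !(PySem.Chars.startswith s ['('] && PySem.Chars.endswith s [')'])
    then '(' :: s ++ [')'] else s
  (s ++ PySem.Int.toChars mid, String.ofList (PySem.Chars.replace s ['§'] ['|']))

-- pass 1 of Source B: the while loop recording the positions of the top-level separators
def pvCutsB : List Char → Nat → Int → List Nat
  | [], _, _ => []
  | '\\' :: _ :: rest, i, depth => pvCutsB rest (i + 2) depth      -- i += 2; continue
  | ['\\'], _, _ => []                                             -- i += 2 leaves the loop
  | c :: rest, i, depth =>
      if c = '(' then pvCutsB rest (i + 1) (depth + 1)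
      else if c = ')' then pvCutsB rest (i + 1) (depth - 1)
      else if c = '|' && depth = 0 then i :: pvCutsB rest (i + 1) depth
      else pvCutsB rest (i + 1) depth

def attach_markers_to_final_regexp_alt (expr : String) (start_id : Int) : String × (List (Int × String)) :=
  let cs := expr.toList
  let n := cs.length
  let cuts := pvCutsB cs 0 0
  let segs := (List.zip ((0 : Nat) :: cuts.map (· + 1)) (cuts ++ [n])).map
      (fun ab => PySem.List.slice cs (some (ab.1 : Int)) (some (ab.2 : Int)))
  -- 'if segs and segs[-1] == "": segs.pop()'
  let segs := if segs.getLast? = some [] then segs.dropLast else segs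
  let pairs := (PySem.List.enumerate segs 0).map (fun ks => pvAnnotateB ks.2 (start_id + ks.1))
  (String.ofList (PySem.Chars.join ['|'] (pairs.map (·.1))),
   (PySem.List.enumerate pairs 0).map (fun kp => (start_id + kp.1, kp.2.2)))

-- ===== PRECONDITION & SPEC =====
def Spec_attach_markers_to_final_regexp (expr : String) (start_id : Int) (out : String × (List (Int × String))) : Prop := out = attach_markers_to_final_regexp_alt expr start_id
instance (expr : String) (start_id : Int) (out : String × (List (Int × String))) : Decidable (Spec_attach_markers_to_final_regexp expr start_id out) := by unfold Spec_attach_markers_to_final_regexp; infer_instance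

-- ===== CLAIM (what is proved, stated in full; the proofs are below) =====
def Claim_equal_attach_markers_to_final_regexp : Prop := ∀ (expr : String) (start_id : Int), Dom_attach_markers_to_final_regexp expr start_id → Spec_attach_markers_to_final_regexp expr start_id (attach_markers_to_final_regexp expr start_id)

-- ===== LEMMAS AND PROOFS =====

-- proof-only helpers
def pvConsHead (p : List Char) : List (List Char) → List (List Char)
  | [] => [p]
  | s :: ss => (p ++ s) :: ss

-- the raw alternatives of cs at depth d, including a possibly empty trailing one
def pvRawSegs : List Char → Int → List (List Char)
  | [], _ => [[]]
  | ['\\'], _ => [['\\']]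
  | '\\' :: c :: rest, d => pvConsHead ['\\', c] (pvRawSegs rest d)
  | c :: rest, d =>
      if c = '|' && pvLevelA c d = 0 then [] :: pvRawSegs rest (pvLevelA c d)
      else pvConsHead [c] (pvRawSegs rest (pvLevelA c d))

def pvDropTrail (ss : List (List Char)) : List (List Char) :=
  if ss.getLast? = some [] then ss.dropLast else ss

-- sequential annotation (what A's loop produces, and what B's enumerate computes)
def pvAnnList : List (List Char) → Int → List (List Char × String)
  | [], _ => []
  | p :: ps, cid => pvAnnotateB p cid :: pvAnnList ps (cid + 1)

def pvMapList : List (List Char) → Int → List (Int × String)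
  | [], _ => []
  | p :: ps, cid => (cid, (pvAnnotateB p cid).2) :: pvMapList ps (cid + 1)

def pvSegsOf (cs : List Char) (cuts : List Nat) (n : Nat) : List (List Char) :=
  (List.zip ((0 : Nat) :: cuts.map (· + 1)) (cuts ++ [n])).map
      (fun ab => PySem.List.slice cs (some (ab.1 : Int)) (some (ab.2 : Int)))

theorem pvRawSegs_ne_nil (cs : List Char) (d : Int) : pvRawSegs cs d ≠ [] := by
  induction cs, d using pvRawSegs.induct with
  | case1 d => simp [pvRawSegs]
  | case2 d => simp [pvRawSegs]
  | case3 c rest d ih =>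
      simp only [pvRawSegs]
      cases h : pvRawSegs rest d <;> simp [pvConsHead]
  | case4 c rest d h1 h2 hc ih =>
      simp only [pvRawSegs, hc, if_true]
      simp
  | case5 c rest d h1 h2 hc ih =>
      simp only [pvRawSegs, hc, if_false]
      cases h : pvRawSegs rest (pvLevelA c d) <;> simp [pvConsHead]

theorem pvConsHead_consHead (a b : List Char) (ss : List (List Char)) :
    pvConsHead a (pvConsHead b ss) = pvConsHead (a ++ b) ss := by
  cases ss <;> simp [pvConsHead]

theorem pvConsHead_nil (ss : List (List Char)) (h : ss ≠ []) : pvConsHead [] ss = ss := by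
  cases ss with
  | nil => cases h rfl
  | cons b t => simp [pvConsHead]

theorem pvDropTrail_cons (a : List Char) (ss : List (List Char)) (h : ss ≠ []) :
    pvDropTrail (a :: ss) = a :: pvDropTrail ss := by
  cases ss with
  | nil => cases h rfl
  | cons b t =>
      unfold pvDropTrail
      rw [List.getLast?_cons_cons]
      split <;> simp

theorem pvSplit_eq_rawSegs (cs : List Char) (cur : List Char) (d : Int) :
    pvSplitTopLevel cs cur d = pvDropTrail (pvConsHead cur (pvRawSegs cs d)) := by
  induction cs, cur, d using pvSplitTopLevel.induct with
  | case1 cur d h =>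
      simp only [pvSplitTopLevel, h, if_true]
      simp only [List.isEmpty_iff] at h
      simp [pvRawSegs, pvConsHead, pvDropTrail, h]
  | case2 cur d h =>
      simp only [pvSplitTopLevel, h]
      simp only [List.isEmpty_iff] at h
      simp [pvRawSegs, pvConsHead, pvDropTrail, h]
  | case3 cur d ih =>
      show pvSplitTopLevel [] (cur ++ ['\\']) d = _
      rw [ih]
      simp [pvRawSegs, pvConsHead]
  | case4 c rest cur d ih =>
      show pvSplitTopLevel rest (cur ++ ['\\', c]) d = _
      rw [ih]
      simp only [pvRawSegs]
      rw [pvConsHead_consHead]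
  | case5 c rest cur d h1 h2 hc ih =>
      rw [pvSplitTopLevel.eq_4 _ _ _ _ h1 h2, if_pos hc, pvRawSegs.eq_4 _ _ _ h1 h2, if_pos hc]
      rw [pvConsHead_nil _ (pvRawSegs_ne_nil _ _)] at ih
      have hraw := pvRawSegs_ne_nil rest (pvLevelA c d)
      cases hr : pvRawSegs rest (pvLevelA c d) with
      | nil => cases hraw hr
      | cons s ss =>
          rw [ih, hr]
          simp only [pvConsHead, List.append_nil]
          rw [pvDropTrail_cons cur (s :: ss) (by simp)]
  | case6 c rest cur d h1 h2 hc ih =>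
      rw [pvSplitTopLevel.eq_4 _ _ _ _ h1 h2, if_neg hc, pvRawSegs.eq_4 _ _ _ h1 h2, if_neg hc]
      rw [ih, pvConsHead_consHead]

theorem pvCutsB_shift (cs : List Char) (d : Int) (i j : Nat) :
    pvCutsB cs (j + i) d = (pvCutsB cs j d).map (· + i) := by
  induction cs, j, d using pvCutsB.induct generalizing i with
  | case1 j d => simp [pvCutsB]
  | case2 c r j d ih =>
      show pvCutsB r (j + i + 2) d = _
      rw [Nat.add_right_comm, ih]
      rfl
  | case3 j d => simp [pvCutsB]
  | case4 r j d h1 h2 ih =>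
      show pvCutsB r (j + i + 1) (d + 1) = _
      rw [Nat.add_right_comm, ih]
      rfl
  | case5 r j d h1 h2 h3 ih =>
      show pvCutsB r (j + i + 1) (d - 1) = _
      rw [Nat.add_right_comm, ih]
      rfl
  | case6 c r j d h1 h2 h3 h4 h5 ih =>
      simp only [Bool.and_eq_true, decide_eq_true_eq] at h5
      obtain ⟨hc, hd⟩ := h5
      subst hc; subst hd
      simp only [pvCutsB]
      rw [Nat.add_right_comm, ih]
      simp
  | case7 c r j d h1 h2 h3 h4 h5 ih =>
      rw [pvCutsB.eq_4 _ _ _ _ h1 h2, pvCutsB.eq_4 _ _ _ _ h1 h2,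
        if_neg h3, if_neg h3, if_neg h4, if_neg h4, if_neg h5, if_neg h5,
        Nat.add_right_comm, ih]

theorem pvSlice_cons (x : Char) (r : List Char) (a b : Nat) :
    PySem.List.slice (x :: r) (some ((a + 1 : Nat) : Int)) (some ((b + 1 : Nat) : Int)) =
      PySem.List.slice r (some ((a : Nat) : Int)) (some ((b : Nat) : Int)) := by
  rw [PySem.List.slice_natCast, PySem.List.slice_natCast]
  simp [Nat.succ_sub_succ]

theorem pvSliceZip_shift (x : Char) (r : List Char) (S E : List Nat) :
    ((S.map (fun k => k + 1)).zip (E.map (fun k => k + 1))).map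
        (fun ab : Nat × Nat => PySem.List.slice (x :: r) (some (ab.1 : Int)) (some (ab.2 : Int))) =
      (S.zip E).map (fun ab : Nat × Nat => PySem.List.slice r (some (ab.1 : Int)) (some (ab.2 : Int))) := by
  rw [List.zip_map, List.map_map]
  refine List.map_congr_left ?_
  intro ab _
  simp only [Function.comp_apply]
  exact pvSlice_cons x r ab.1 ab.2

theorem pvSegsOf_cons1 (x : Char) (r : List Char) (cuts : List Nat) (n : Nat) :
    pvSegsOf (x :: r) (cuts.map (· + 1)) (n + 1) = pvConsHead [x] (pvSegsOf r cuts n) := by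
  cases cuts with
  | nil =>
      simp [pvSegsOf, pvConsHead, PySem.List.slice_natCast]
  | cons p ps =>
      simp only [pvSegsOf, List.map_cons, List.cons_append, List.zip_cons_cons, pvConsHead]
      congr 1
      · rw [PySem.List.slice_natCast, PySem.List.slice_natCast]
        simp
      · have h1 : (p + 1 + 1 : Nat) :: (ps.map (· + 1)).map (· + 1) =
            ((p + 1) :: ps.map (· + 1)).map (fun k => k + 1) := by simp
        have h2 : ps.map (· + 1) ++ [n + 1] = (ps ++ [n]).map (fun k => k + 1) := by simp
        rw [h1, h2, pvSliceZip_shift]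

theorem pvSegsOf_cons2 (x y : Char) (r : List Char) (cuts : List Nat) (n : Nat) :
    pvSegsOf (x :: y :: r) (cuts.map (· + 2)) (n + 2) = pvConsHead [x, y] (pvSegsOf r cuts n) := by
  have h : cuts.map (· + 2) = (cuts.map (· + 1)).map (· + 1) := by
    simp [List.map_map]
  rw [h, show (n + 2) = (n + 1) + 1 from rfl, pvSegsOf_cons1, pvSegsOf_cons1, pvConsHead_consHead]
  rfl

theorem pvSegsOf_cut (x : Char) (r : List Char) (cuts : List Nat) (n : Nat) :
    pvSegsOf (x :: r) (0 :: cuts.map (· + 1)) (n + 1) = [] :: pvSegsOf r cuts n := by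
  simp only [pvSegsOf, List.map_cons, List.cons_append, List.zip_cons_cons]
  congr 1
  have h1 : (0 + 1 : Nat) :: (cuts.map (· + 1)).map (· + 1) =
      ((0 : Nat) :: cuts.map (· + 1)).map (fun k => k + 1) := by simp
  have h2 : cuts.map (· + 1) ++ [n + 1] = (cuts ++ [n]).map (fun k => k + 1) := by simp
  rw [h1, h2, pvSliceZip_shift]

theorem pvSegsOf_eq_rawSegs (cs : List Char) (d : Int) :
    pvSegsOf cs (pvCutsB cs 0 d) cs.length = pvRawSegs cs d := by
  induction cs, d using pvRawSegs.induct with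
  | case1 d => simp [pvSegsOf, pvRawSegs, pvCutsB, PySem.List.slice_natCast]
  | case2 d =>
      simp [pvSegsOf, pvRawSegs, pvCutsB, PySem.List.slice_natCast]
  | case3 c rest d ih =>
      have hcuts : pvCutsB ('\\' :: c :: rest) 0 d = (pvCutsB rest 0 d).map (· + 2) := by
        show pvCutsB rest 2 d = _
        exact pvCutsB_shift rest d 2 0
      rw [hcuts, show ('\\' :: c :: rest).length = rest.length + 2 by simp,
        pvSegsOf_cons2, ih]
      simp [pvRawSegs]
  | case4 c rest d h1 h2 hc ih =>
      simp only [Bool.and_eq_true, decide_eq_true_eq] at hc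
      obtain ⟨hcp, hd⟩ := hc
      subst hcp
      have hlv : ∀ e : Int, pvLevelA '|' e = e := fun e => by
        unfold pvLevelA; rw [if_neg (by decide), if_neg (by decide)]
      rw [hlv] at hd ih
      subst hd
      have hcuts : pvCutsB ('|' :: rest) 0 0 = 0 :: (pvCutsB rest 0 0).map (· + 1) := by
        rw [pvCutsB.eq_4 _ _ _ _ h2 h1, if_neg (by decide), if_neg (by decide),
          if_pos (show (decide ('|' = '|') && decide ((0 : Int) = 0)) = true by decide)]
        exact congrArg _ (pvCutsB_shift rest 0 1 0)
      rw [hcuts, show ('|' :: rest).length = rest.length + 1 by simp, pvSegsOf_cut, ih]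
      rw [pvRawSegs.eq_4 _ _ _ h1 h2, if_pos (by decide), hlv]
  | case5 c rest d h1 h2 hc ih =>
      rw [pvRawSegs.eq_4 _ _ _ h1 h2, if_neg hc]
      by_cases hp : c = '('
      · subst hp
        have hcuts : pvCutsB ('(' :: rest) 0 d = (pvCutsB rest 0 (d + 1)).map (· + 1) := by
          rw [pvCutsB.eq_4 _ _ _ _ h2 h1, if_pos rfl]
          exact pvCutsB_shift rest (d + 1) 1 0
        rw [hcuts, show ('(' :: rest).length = rest.length + 1 by simp, pvSegsOf_cons1]
        have hlv : ∀ e : Int, pvLevelA '(' e = e + 1 := fun e => by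
          unfold pvLevelA; rw [if_pos rfl]
        rw [hlv] at ih
        rw [ih, hlv]
      · by_cases hq : c = ')'
        · subst hq
          have hcuts : pvCutsB (')' :: rest) 0 d = (pvCutsB rest 0 (d - 1)).map (· + 1) := by
            rw [pvCutsB.eq_4 _ _ _ _ h2 h1, if_neg (by decide), if_pos rfl]
            exact pvCutsB_shift rest (d - 1) 1 0
          rw [hcuts, show (')' :: rest).length = rest.length + 1 by simp, pvSegsOf_cons1]
          have hlv : ∀ e : Int, pvLevelA ')' e = e - 1 := fun e => by
            unfold pvLevelA; rw [if_neg (by decide), if_pos rfl]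
          rw [hlv] at ih
          rw [ih, hlv]
        · have hlv : pvLevelA c d = d := by simp [pvLevelA, hp, hq]
          have hcut' : ¬((decide (c = '|') && decide (d = 0)) = true) := by
            simpa [hlv] using hc
          have hcuts : pvCutsB (c :: rest) 0 d = (pvCutsB rest 0 d).map (· + 1) := by
            rw [pvCutsB.eq_4 _ _ _ _ h2 h1, if_neg hp, if_neg hq, if_neg hcut']
            exact pvCutsB_shift rest d 1 0
          rw [hcuts, show (c :: rest).length = rest.length + 1 by simp, pvSegsOf_cons1]
          rw [hlv] at ih
          rw [ih, hlv]

theorem pvAttachLoopA_eq (ps : List (List Char)) (out : List (List Char)) (mp : List (Int × String)) (cid : Int) :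
    pvAttachLoopA ps (out, mp, cid) = (out ++ (pvAnnList ps cid).map (·.1), mp ++ pvMapList ps cid, cid + ps.length) := by
  induction ps generalizing out mp cid with
  | nil => simp [pvAttachLoopA, pvAnnList, pvMapList]
  | cons p ps ih =>
      simp only [pvAttachLoopA, pvAnnList, pvMapList, pvAnnotateB, List.map_cons]
      rw [ih]
      simp only [Prod.mk.injEq, List.append_assoc, List.singleton_append, List.length_cons]
      refine ⟨trivial, trivial, by push_cast; ring⟩

theorem pvEnum_annotate (ps : List (List Char)) (cid s : Int) :
    (PySem.List.enumerate ps s).map (fun ks => pvAnnotateB ks.2 (cid + ks.1)) = pvAnnList ps (cid + s) := by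
  induction ps generalizing s with
  | nil => simp [pvAnnList, PySem.List.enumerate_nil]
  | cons p ps ih =>
      simp only [PySem.List.enumerate_cons, List.map_cons, pvAnnList]
      rw [ih (s + 1)]
      ring_nf

theorem pvEnum_mapping (ps : List (List Char)) (c0 s : Int) :
    (PySem.List.enumerate (pvAnnList ps (c0 + s)) s).map (fun kp => (c0 + kp.1, kp.2.2)) = pvMapList ps (c0 + s) := by
  induction ps generalizing s with
  | nil => simp [pvAnnList, pvMapList, PySem.List.enumerate_nil]
  | cons p ps ih =>
      simp only [pvAnnList, PySem.List.enumerate_cons, List.map_cons, pvMapList]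
      have : c0 + s + 1 = c0 + (s + 1) := by ring
      rw [this, ih (s + 1)]

-- ===== VERDICT (by name: the statement is the Claim_ definition above) =====
theorem attach_markers_to_final_regexp_spec : Claim_equal_attach_markers_to_final_regexp := by
  intro expr start_id _
  unfold Spec_attach_markers_to_final_regexp
  have eB : attach_markers_to_final_regexp_alt expr start_id
      = (let segs := pvDropTrail (pvSegsOf expr.toList (pvCutsB expr.toList 0 0) expr.toList.length);
         let pairs := (PySem.List.enumerate segs 0).map (fun ks => pvAnnotateB ks.2 (start_id + ks.1));
         (String.ofList (PySem.Chars.join ['|'] (pairs.map (·.1))),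
          (PySem.List.enumerate pairs 0).map (fun kp => (start_id + kp.1, kp.2.2)))) := rfl
  rw [eB]
  dsimp only
  rw [pvSegsOf_eq_rawSegs]
  rw [pvEnum_annotate, add_zero]
  have hm := pvEnum_mapping (pvDropTrail (pvRawSegs expr.toList 0)) start_id 0
  rw [add_zero] at hm
  rw [hm]
  unfold attach_markers_to_final_regexp
  dsimp only
  rw [pvSplit_eq_rawSegs, pvConsHead_nil _ (pvRawSegs_ne_nil _ _), pvAttachLoopA_eq]
  simp only [List.nil_append]
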